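-- pv_equiv track=rewrite | github.com/chanbakjsd/SC1015 | bpe.py | _tokenize_into_words
-- ===== SOURCE A (Python) =====
-- symbols = set(" \n-:,.()!?")
--
-- def _tokenize_into_words(text: str) -> list[str]:
--     words = []
--     i = -1
--     start = 0
--     while i < len(text)-1:
--         i += 1
--         c = text[i]
--         if start == i:
--             continue
--         if (text[i-1] in symbols) == (c in symbols):
--             continue
--         words.append(text[start:i])
--         start = i
--     if start < len(text):
--         words.append(text[start:])
--     return words
-- ===== SOURCE B (Python) =====
-- from itertools import groupby
--
-- symbols = set(" \n-:,.()!?")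
--
-- def _tokenize_into_words(text: str) -> list[str]:
--     return ["".join(g) for _, g in groupby(text, key=lambda c: c in symbols)]
-- ===== Notes on version B (the rewrite author's own statement) =====
-- stated objective: idiomatic
-- what changed: Replaced the manual index/start-pointer while loop with itertools.groupby keyed on symbol-class, joining each maximal same-class run.
import Mathlib
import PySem

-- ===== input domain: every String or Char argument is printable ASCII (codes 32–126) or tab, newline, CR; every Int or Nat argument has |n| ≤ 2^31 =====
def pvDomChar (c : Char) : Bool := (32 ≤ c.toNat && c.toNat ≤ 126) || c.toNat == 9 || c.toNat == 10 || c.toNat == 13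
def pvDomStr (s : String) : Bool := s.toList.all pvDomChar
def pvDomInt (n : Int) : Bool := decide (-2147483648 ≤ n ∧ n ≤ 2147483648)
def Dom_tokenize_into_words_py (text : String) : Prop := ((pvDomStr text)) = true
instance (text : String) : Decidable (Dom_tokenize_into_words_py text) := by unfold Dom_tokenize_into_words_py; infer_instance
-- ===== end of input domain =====

-- B replaces A's manual index/start-pointer while loop by itertools.groupby on the
-- symbol-class of each character (objective: idiomatic). Return values are identical.

-- module-level `symbols = set(" \n-:,.()!?")`; `c in symbols` for both versions
def pvSym (c : Char) : Bool :=
  [' ', '\n', '-', ':', ',', '.', '(', ')', '!', '?'].contains c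

-- ===== PORT A =====
-- the while loop of A, step for step: i is the scanning index, s the `start` pointer.
-- text[start:i] with 0 ≤ start ≤ i is exactly (drop start).take (i - start); text[j]
-- for the in-range indices the loop reaches is List.getD j.
def pvLoopA (L : List Char) (ws : List String) (s i : Nat) : List String :=
  if i < L.length then
    if s = i then pvLoopA L ws s (i+1)
    else if pvSym (L.getD (i-1) ' ') == pvSym (L.getD i ' ') then pvLoopA L ws s (i+1)
    else pvLoopA L (ws ++ [String.ofList ((L.drop s).take (i - s))]) i (i+1)
  else if s < L.length then ws ++ [String.ofList (L.drop s)] else ws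
termination_by L.length - i

def tokenize_into_words_py (text : String) : List String :=
  pvLoopA text.toList [] 0 0

-- ===== PORT B =====
-- itertools.groupby(text, key=λ c. c in symbols): take the maximal run of the head's
-- class, emit it, recurse on the remainder.
def pvTakeRun (k : Bool) : List Char → List Char × List Char
  | [] => ([], [])
  | c :: cs =>
    if pvSym c = k then
      let p := pvTakeRun k cs
      (c :: p.1, p.2)
    else ([], c :: cs)

theorem pvTakeRun_snd_length (k : Bool) (xs : List Char) :
    (pvTakeRun k xs).2.length ≤ xs.length := by
  induction xs with
  | nil => simp [pvTakeRun]
  | cons c cs ih =>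
    simp only [pvTakeRun]
    split <;> simp
    omega

def pvGroupRuns : List Char → List (List Char)
  | [] => []
  | c :: cs =>
    let p := pvTakeRun (pvSym c) cs
    (c :: p.1) :: pvGroupRuns p.2
termination_by L => L.length
decreasing_by
  have := pvTakeRun_snd_length (pvSym c) cs
  simp; omega

def tokenize_into_words_py_alt (text : String) : List String :=
  (pvGroupRuns text.toList).map (fun r => String.ofList r)

-- ===== PRECONDITION & SPEC =====
def Spec_tokenize_into_words_py (text : String) (out : List String) : Prop := out = tokenize_into_words_py_alt text
instance (text : String) (out : List String) : Decidable (Spec_tokenize_into_words_py text out) := by unfold Spec_tokenize_into_words_py; infer_instance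

-- ===== CLAIM (what is proved, stated in full; the proofs are below) =====
def Claim_equal_tokenize_into_words_py : Prop := ∀ (text : String), Dom_tokenize_into_words_py text → Spec_tokenize_into_words_py text (tokenize_into_words_py text)

-- ===== LEMMAS AND PROOFS =====

theorem pvTakeRun_spec (k : Bool) (xs : List Char) :
    xs = (pvTakeRun k xs).1 ++ (pvTakeRun k xs).2 ∧
    (∀ x ∈ (pvTakeRun k xs).1, pvSym x = k) ∧
    (∀ d t, (pvTakeRun k xs).2 = d :: t → pvSym d ≠ k) := by
  induction xs with
  | nil => simp [pvTakeRun]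
  | cons c cs ih =>
    by_cases h : pvSym c = k
    · simp only [pvTakeRun, if_pos h]
      refine ⟨by simpa using ih.1, ?_, by simpa using ih.2.2⟩
      intro x hx
      rcases List.mem_cons.mp hx with rfl | hx
      · exact h
      · exact ih.2.1 x hx
    · simp only [pvTakeRun, if_neg h]
      exact ⟨rfl, by simp, fun d t hdt => by cases hdt; exact h⟩

theorem pv_getD_of_drop (L : List Char) (i : Nat) (d : Char) (t : List Char)
    (h : L.drop i = d :: t) : L.getD i ' ' = d ∧ i < L.length ∧ L.drop (i+1) = t := by
  have hi : i < L.length := by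
    by_contra h'
    rw [List.drop_eq_nil_of_le (by omega)] at h
    simp at h
  have hd : L.drop i = L[i] :: L.drop (i+1) := List.drop_eq_getElem_cons hi
  rw [hd] at h
  obtain ⟨rfl, rfl⟩ := List.cons.inj h
  exact ⟨by simp [List.getD_eq_getElem?_getD, List.getElem?_eq_getElem hi], hi, rfl⟩

-- skipping phase: while inside a run of class k, the loop only advances i
theorem pv_loop_skip (r : List Char) : ∀ (rest : List Char) (L : List Char) (s i : Nat)
    (ws : List String) (k : Bool),
    s < i → s < L.length → L.drop i = r ++ rest →
    pvSym (L.getD (i-1) ' ') = k → (∀ x ∈ r, pvSym x = k) →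
    (∀ d t, rest = d :: t → pvSym d ≠ k) →
    pvLoopA L ws s i =
      match rest with
      | [] => ws ++ [String.ofList (L.drop s)]
      | _ :: _ => pvLoopA L (ws ++ [String.ofList ((L.drop s).take (i + r.length - s))])
                    (i + r.length) (i + r.length + 1) := by
  induction r with
  | nil =>
    intro rest L s i ws k hsi hsL hdrop hprev _ hrest
    cases rest with
    | nil =>
      have hle : L.length ≤ i := by
        by_contra h'
        rw [List.drop_eq_getElem_cons (by omega)] at hdrop
        exact absurd hdrop (List.cons_ne_nil _ _)
      rw [pvLoopA]
      rw [if_neg (by omega), if_pos hsL]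
    | cons d t =>
      obtain ⟨hget, hiL, _⟩ := pv_getD_of_drop L i d t (by simpa using hdrop)
      have hcls : (pvSym (L.getD (i-1) ' ') == pvSym (L.getD i ' ')) = false := by
        have := hrest d t rfl
        rw [hget, hprev]
        simp only [beq_eq_false_iff_ne, ne_eq]
        exact fun h => this h.symm
      rw [pvLoopA, if_pos hiL, if_neg (by omega), hcls]
      simp
  | cons x r' ih =>
    intro rest L s i ws k hsi hsL hdrop hprev hrun hrest
    obtain ⟨hget, hiL, hdrop'⟩ := pv_getD_of_drop L i x (r' ++ rest) (by simpa using hdrop)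
    have hx : pvSym x = k := hrun x (by simp)
    have hcls : (pvSym (L.getD (i-1) ' ') == pvSym (L.getD i ' ')) = true := by
      rw [hget, hprev, hx]; simp
    rw [pvLoopA, if_pos hiL, if_neg (by omega), hcls]
    simp only [if_true]
    have := ih rest L s (i+1) ws k (by omega) hsL hdrop'
      (by simp only [Nat.add_sub_cancel]; rw [hget]; exact hx)
      (fun y hy => hrun y (by simp [hy])) hrest
    have harith : i + 1 + r'.length = i + (x :: r').length := by simp; omega
    rw [harith] at this
    exact this

theorem pv_loop_main (m : Nat) : ∀ (L : List Char) (s : Nat) (ws : List String),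
    L.length - s ≤ m → s < L.length →
    pvLoopA L ws s (s+1) = ws ++ (pvGroupRuns (L.drop s)).map (fun r => String.ofList r) := by
  induction m with
  | zero => intro L s ws h1 h2; omega
  | succ m ih =>
    intro L s ws h1 h2
    have hdrop : L.drop s = L[s] :: L.drop (s+1) := List.drop_eq_getElem_cons h2
    obtain ⟨r, rest, hTR⟩ : ∃ r rest, pvTakeRun (pvSym L[s]) (L.drop (s+1)) = (r, rest) :=
      ⟨_, _, rfl⟩
    have hspec := pvTakeRun_spec (pvSym L[s]) (L.drop (s+1))
    rw [hTR] at hspec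
    obtain ⟨hsplit, hrun, hrest⟩ := hspec
    replace hsplit : L.drop (s+1) = r ++ rest := hsplit
    replace hrun : ∀ x ∈ r, pvSym x = pvSym L[s] := hrun
    replace hrest : ∀ (d : Char) (t : List Char), rest = d :: t → pvSym d ≠ pvSym L[s] := hrest
    have hprev : pvSym (L.getD ((s+1)-1) ' ') = pvSym L[s] := by
      simp only [Nat.add_sub_cancel]
      rw [List.getD_eq_getElem?_getD, List.getElem?_eq_getElem h2]
      rfl
    have hskip := pv_loop_skip r rest L s (s+1) ws (pvSym L[s]) (by omega) h2
      (by rw [hsplit]) hprev hrun hrest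
    have hGR : pvGroupRuns (L.drop s) = (L[s] :: r) :: pvGroupRuns rest := by
      rw [hdrop, pvGroupRuns, hTR]
    cases rest with
    | nil =>
      rw [hskip, hGR]
      have hds : L.drop s = L[s] :: r := by rw [hdrop, hsplit, List.append_nil]
      rw [hds]
      simp [pvGroupRuns]
    | cons d t =>
      have hdropj : L.drop (s+1+r.length) = d :: t := by
        have h' : L.drop (s+1+r.length) = (L.drop (s+1)).drop r.length := by
          rw [List.drop_drop]
        rw [h', hsplit, List.drop_left]
      have hjL : s+1+r.length < L.length := by
        by_contra h'
        rw [List.drop_eq_nil_of_le (by omega)] at hdropj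
        simp at hdropj
      have htake : (L.drop s).take (s+1+r.length - s) = L[s] :: r := by
        rw [hdrop, hsplit]
        have h' : s+1+r.length - s = r.length + 1 := by omega
        rw [h']
        simp
      have hrec := ih L (s+1+r.length) (ws ++ [String.ofList (L[s] :: r)]) (by omega) hjL
      rw [hskip, htake, hrec, hdropj, hGR]
      simp

-- ===== VERDICT (by name: the statement is the Claim_ definition above) =====
theorem tokenize_into_words_py_spec : Claim_equal_tokenize_into_words_py := by
  intro text _
  unfold Spec_tokenize_into_words_py tokenize_into_words_py tokenize_into_words_py_alt
  cases hL : text.toList with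
  | nil => rw [pvLoopA]; simp [pvGroupRuns]
  | cons c cs =>
    rw [pvLoopA, if_pos (by simp), if_pos rfl]
    have := pv_loop_main (c :: cs).length (c :: cs) 0 [] (by omega) (by simp)
    simpa using this
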